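-- pv_equiv track=rewrite | github.com/Aurora-Program/Trinity | trigate3.py | _find_golden_triplets
-- ===== SOURCE A (Python) =====
-- def _find_golden_triplets(S: int) -> list:
--     """Encuentra tripletas usando umbral áureo 2/3"""
--     triplets = []
--     for R1 in range(8):
--         for R2 in range(8):
--             for R3 in range(8):
--                 # Coincidencia con umbral áureo (2/3 bits)
--                 match_count = 0
--                 for i in range(3):
--                     r1_bit = (R1 >> i) & 1
--                     r2_bit = (R2 >> i) & 1
--                     r3_bit = (R3 >> i) & 1
--                     s_bit = (S >> i) & 1
--
--                     majority_bit = 1 if (r1_bit + r2_bit + r3_bit) >= 2 else 0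
--                     if majority_bit == s_bit:
--                         match_count += 1
--
--                 # Umbral áureo: 2/3 bits coincidentes
--                 if match_count >= 2:
--                     triplets.append((R1, R2, R3))
--     return triplets
-- ===== SOURCE B (Python) =====
-- def _find_golden_triplets(S: int) -> list:
--     """Same triplets, but the per-bit inner loop is replaced by a closed-form
--     bitwise majority and a popcount of disagreements with S's low 3 bits."""
--     s = S % 8
--     triplets = []
--     for R1 in range(8):
--         for R2 in range(8):
--             for R3 in range(8):
--                 maj = (R1 & R2) | (R1 & R3) | (R2 & R3)
--                 if bin(maj ^ s).count('1') <= 1: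
--                     triplets.append((R1, R2, R3))
--     return triplets
-- ===== Notes on version B (the rewrite author's own statement) =====
-- stated objective: simpler
-- what changed: The per-bit inner loop (summing bits to decide each majority and counting matching positions) is replaced by a closed-form bitwise majority (R1&R2)|(R1&R3)|(R2&R3) and a popcount of its disagreement with the low bits of S, accepted when at most one bit disagrees.
import Mathlib
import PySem

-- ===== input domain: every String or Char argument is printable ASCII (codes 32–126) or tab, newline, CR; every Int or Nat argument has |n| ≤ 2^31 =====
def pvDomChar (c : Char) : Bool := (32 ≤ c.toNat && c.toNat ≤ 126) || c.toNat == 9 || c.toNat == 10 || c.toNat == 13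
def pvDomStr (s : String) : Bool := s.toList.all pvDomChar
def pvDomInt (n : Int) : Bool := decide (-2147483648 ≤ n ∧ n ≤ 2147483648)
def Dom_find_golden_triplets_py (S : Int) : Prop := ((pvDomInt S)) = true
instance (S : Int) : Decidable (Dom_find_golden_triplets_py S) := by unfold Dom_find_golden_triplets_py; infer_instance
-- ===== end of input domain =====

-- B replaces A's per-bit inner loop (sum-based majority, bit-by-bit match count) by a
-- closed-form bitwise majority and a popcount of the disagreements with the low bits of S
-- (objective: simpler; same value on every input, both are total).

-- ===== PORT A =====
-- Python '>> i' on int is Lean's '>>> i.toNat' (exact, i ≥ 0 here); '& 1' is PySem.Int.band.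
def find_golden_triplets_py (S : Int) : List (Int × Int × Int) :=
  (PySem.List.pyRange 0 8 1).foldl (fun acc1 R1 =>
    (PySem.List.pyRange 0 8 1).foldl (fun acc2 R2 =>
      (PySem.List.pyRange 0 8 1).foldl (fun acc3 R3 =>
        let match_count : Int :=
          (PySem.List.pyRange 0 3 1).foldl (fun mc i =>
            let r1_bit := PySem.Int.band (R1 >>> i.toNat) 1
            let r2_bit := PySem.Int.band (R2 >>> i.toNat) 1
            let r3_bit := PySem.Int.band (R3 >>> i.toNat) 1
            let s_bit  := PySem.Int.band (S >>> i.toNat) 1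
            let majority_bit : Int := if r1_bit + r2_bit + r3_bit ≥ 2 then 1 else 0
            if majority_bit = s_bit then mc + 1 else mc) 0
        if match_count ≥ 2 then acc3 ++ [(R1, R2, R3)] else acc3) acc2) acc1) []

-- ===== PORT B =====
-- bin(x).count('1') on the nonnegative x here is PySem.Int.bitCount (popcount of |x|).
def find_golden_triplets_py_alt (S : Int) : List (Int × Int × Int) :=
  let s := PySem.Int.mod S 8
  (PySem.List.pyRange 0 8 1).foldl (fun acc1 R1 =>
    (PySem.List.pyRange 0 8 1).foldl (fun acc2 R2 =>
      (PySem.List.pyRange 0 8 1).foldl (fun acc3 R3 =>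
        let maj := PySem.Int.bor (PySem.Int.bor (PySem.Int.band R1 R2) (PySem.Int.band R1 R3)) (PySem.Int.band R2 R3)
        if PySem.Int.bitCount (PySem.Int.bxor maj s) ≤ 1 then acc3 ++ [(R1, R2, R3)] else acc3) acc2) acc1) []

-- ===== PRECONDITION & SPEC =====
def Spec_find_golden_triplets_py (S : Int) (out : List (Int × Int × Int)) : Prop := out = find_golden_triplets_py_alt S
instance (S : Int) (out : List (Int × Int × Int)) : Decidable (Spec_find_golden_triplets_py S out) := by unfold Spec_find_golden_triplets_py; infer_instance

-- ===== CLAIM (what is proved, stated in full; the proofs are below) =====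
def Claim_equal_find_golden_triplets_py : Prop := ∀ (S : Int), Dom_find_golden_triplets_py S → Spec_find_golden_triplets_py S (find_golden_triplets_py S)

-- ===== LEMMAS AND PROOFS =====

-- The three low bits of S determine A's result: A reads S only through (S >> i) & 1, i = 0,1,2.
lemma A_congr (S T : Int)
    (h0 : PySem.Int.band (S >>> (((0:Int).toNat : Nat) : Int)) 1 = PySem.Int.band (T >>> (((0:Int).toNat : Nat) : Int)) 1)
    (h1 : PySem.Int.band (S >>> (((1:Int).toNat : Nat) : Int)) 1 = PySem.Int.band (T >>> (((1:Int).toNat : Nat) : Int)) 1)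
    (h2 : PySem.Int.band (S >>> (((2:Int).toNat : Nat) : Int)) 1 = PySem.Int.band (T >>> (((2:Int).toNat : Nat) : Int)) 1) :
    find_golden_triplets_py S = find_golden_triplets_py T := by
  unfold find_golden_triplets_py
  simp only [show PySem.List.pyRange 0 3 1 = [0, 1, 2] from rfl, List.foldl, h0, h1, h2]

-- low bits of S agree with those of S % 8
lemma band_shift_mod (S : Int) (k : Nat) (hk : k < 3) :
    PySem.Int.band (S >>> k) 1 = PySem.Int.band (PySem.Int.mod S 8 >>> k) 1 := by
  simp only [PySem.Int.band_one, Int.shiftRight_eq_div_pow,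
    PySem.Int.mod_eq_emod_of_pos (by norm_num : (0:Int) < 2),
    PySem.Int.mod_eq_emod_of_pos (by norm_num : (0:Int) < 8)]
  interval_cases k <;> norm_num <;> omega

lemma A_mod (S : Int) :
    find_golden_triplets_py S = find_golden_triplets_py (PySem.Int.mod S 8) := by
  refine A_congr S _ ?_ ?_ ?_ <;>
    · rw [Int.shiftRight_natCast_right, Int.shiftRight_natCast_right]
      exact band_shift_mod S _ (by decide)

lemma B_mod (S : Int) :
    find_golden_triplets_py_alt S = find_golden_triplets_py_alt (PySem.Int.mod S 8) := by
  unfold find_golden_triplets_py_alt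
  have h1 := PySem.Int.mod_nonneg S (b := 8) (by norm_num)
  have h2 := PySem.Int.mod_lt S (b := 8) (by norm_num)
  have h : PySem.Int.mod (PySem.Int.mod S 8) 8 = PySem.Int.mod S 8 := by
    rw [PySem.Int.mod_eq_emod_of_pos (b := 8) (by norm_num)]
    omega
  rw [h]

-- ===== VERDICT (by name: the statement is the Claim_ definition above) =====
set_option maxRecDepth 100000 in
theorem find_golden_triplets_py_spec : Claim_equal_find_golden_triplets_py := by
  intro S _
  unfold Spec_find_golden_triplets_py
  rw [A_mod S, B_mod S]
  have h1 := PySem.Int.mod_nonneg S (b := 8) (by norm_num)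
  have h2 := PySem.Int.mod_lt S (b := 8) (by norm_num)
  generalize hr : PySem.Int.mod S 8 = r at h1 h2
  interval_cases r <;> decide
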